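-- pv_equiv track=rewrite | github.com/ekazakos/grove | infer_iground.py | sliding_segment_with_mask
-- ===== SOURCE A (Python) =====
-- def sliding_segment_with_mask(num_frames=48, num_segments=8):
--     """
--     Apply the VLM model using a sliding window approach within segments,
--     ensuring all frames are covered. Also returns a mask for non-repeating elements.
--
--     :param num_frames: total number of frames in the video
--     :param num_segments: number of segments to divide the video into (default 8)
--     :return: tuple (all_indices, masks)
--         all_indices: list of lists, each containing frame indices for sampling
--         masks: list of lists, with 1's for non-repeating elements and 0's for repeating
--     """
--     segment_size = num_frames // num_segments
--     remainder = num_frames % num_segments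
--     all_indices = []
--     masks = []
--
--     # Track which frames have been seen
--     seen_frames = set()
--
--     # Handle the main part of the video
--     for offset in range(segment_size):
--         frame_indices = [i * segment_size + offset for i in range(num_segments)]
--         mask = [1 if idx not in seen_frames else 0 for idx in frame_indices]
--         all_indices.append(frame_indices)
--         masks.append(mask)
--         seen_frames.update(frame_indices)
--
--     # Handle the remaining frames
--     if remainder > 0:
--         for offset in range(remainder):
--             frame_indices = [i * segment_size + segment_size + offset for i in range(num_segments)]
--             frame_indices = [idx for idx in frame_indices if idx < num_frames]
--             if frame_indices:
--                 mask = [1 if idx not in seen_frames else 0 for idx in frame_indices]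
--                 all_indices.append(frame_indices)
--                 masks.append(mask)
--                 seen_frames.update(frame_indices)
--
--     return all_indices, masks
-- ===== SOURCE B (Python) =====
-- def sliding_segment_with_mask(num_frames=48, num_segments=8):
--     """Sliding frame-sampling rows with non-repeat masks.
--
--     Builds all index rows first, then derives the masks in a second phase from
--     a first-occurrence map: an entry is non-repeating exactly when its row is
--     the first row in which that frame index appears.
--     """
--     segment_size, remainder = divmod(num_frames, num_segments)
--     rows = [[i * segment_size + offset for i in range(num_segments)]
--             for offset in range(segment_size)]
--     for offset in range(remainder):
--         row = [i * segment_size + segment_size + offset for i in range(num_segments)]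
--         row = [idx for idx in row if idx < num_frames]
--         if row:
--             rows.append(row)
--     first_row = {}
--     for t, row in enumerate(rows):
--         for idx in row:
--             first_row.setdefault(idx, t)
--     masks = [[1 if first_row[idx] == t else 0 for idx in row]
--              for t, row in enumerate(rows)]
--     return rows, masks
-- ===== Notes on version B (the rewrite author's own statement) =====
-- stated objective: alternative
-- what changed: B drops A's seen_frames set threaded through construction: it builds all index rows first, then derives every mask in a separate phase from a first-occurrence map (dict from frame index to the first row containing it), marking an entry 1 exactly when its row is that first row; Pre_ excludes only num_segments = 0, where A raises ZeroDivisionError (so does B).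
import Mathlib
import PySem

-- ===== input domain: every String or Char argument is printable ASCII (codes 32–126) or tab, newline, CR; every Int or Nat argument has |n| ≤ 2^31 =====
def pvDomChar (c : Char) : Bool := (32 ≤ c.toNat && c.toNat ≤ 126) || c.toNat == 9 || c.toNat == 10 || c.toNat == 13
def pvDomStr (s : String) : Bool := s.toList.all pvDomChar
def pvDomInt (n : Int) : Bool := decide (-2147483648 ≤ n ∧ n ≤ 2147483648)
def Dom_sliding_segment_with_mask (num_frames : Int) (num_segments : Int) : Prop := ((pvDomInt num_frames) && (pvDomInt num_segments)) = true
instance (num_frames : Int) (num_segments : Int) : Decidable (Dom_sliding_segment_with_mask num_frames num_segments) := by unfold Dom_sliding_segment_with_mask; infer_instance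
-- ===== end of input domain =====

-- B replaces A's seen_frames set (threaded through construction) by a two-phase scheme:
-- build all rows first, then derive masks from a first-occurrence map (index -> first row).

-- ===== PORT A =====
-- loop body of A's first (main) loop; state = (all_indices, masks, seen_frames)
def pvAMainStep (s ns : Int) (st : List (List Int) × List (List Int) × PySem.Set Int)
    (offset : Int) : List (List Int) × List (List Int) × PySem.Set Int :=
  let frame_indices := (PySem.List.pyRange 0 ns 1).map (fun i => i * s + offset)
  let mask := frame_indices.map (fun idx => if PySem.Set.contains st.2.2 idx then (0 : Int) else 1)
  (st.1 ++ [frame_indices], st.2.1 ++ [mask], PySem.Set.update st.2.2 frame_indices)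
-- loop body of A's remainder loop
def pvARemStep (nf s ns : Int) (st : List (List Int) × List (List Int) × PySem.Set Int)
    (offset : Int) : List (List Int) × List (List Int) × PySem.Set Int :=
  let frame_indices := (PySem.List.pyRange 0 ns 1).map (fun i => i * s + s + offset)
  let frame_indices := frame_indices.filter (fun idx => decide (idx < nf))
  if frame_indices.isEmpty then st
  else
    let mask := frame_indices.map (fun idx => if PySem.Set.contains st.2.2 idx then (0 : Int) else 1)
    (st.1 ++ [frame_indices], st.2.1 ++ [mask], PySem.Set.update st.2.2 frame_indices)
def sliding_segment_with_mask (num_frames : Int) (num_segments : Int) :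
    List (List Int) × List (List Int) :=
  let segment_size := PySem.Int.floordiv num_frames num_segments
  let remainder := PySem.Int.mod num_frames num_segments
  let st := (PySem.List.pyRange 0 segment_size 1).foldl
      (pvAMainStep segment_size num_segments) ([], [], PySem.Set.empty)
  let st := if remainder > 0 then
      (PySem.List.pyRange 0 remainder 1).foldl
        (pvARemStep num_frames segment_size num_segments) st
    else st
  (st.1, st.2.1)

-- ===== PORT B =====
-- B's remainder-row loop: append the filtered row when it is nonempty
def pvBRemStep (nf s ns : Int) (rows : List (List Int)) (offset : Int) : List (List Int) :=
  let row := (PySem.List.pyRange 0 ns 1).map (fun i => i * s + s + offset)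
  let row := row.filter (fun idx => decide (idx < nf))
  if row.isEmpty then rows else rows ++ [row]
-- B's first_row loop body: setdefault every index of row p.2 to its row number p.1
def pvBDictStep (d : PySem.Dict Int Int) (p : Int × List Int) : PySem.Dict Int Int :=
  p.2.foldl (fun d idx => PySem.Dict.setdefault d idx p.1) d
def sliding_segment_with_mask_alt (num_frames : Int) (num_segments : Int) :
    List (List Int) × List (List Int) :=
  let s := PySem.Int.floordiv num_frames num_segments
  let r := PySem.Int.mod num_frames num_segments
  let rows := (PySem.List.pyRange 0 s 1).map
      (fun offset => (PySem.List.pyRange 0 num_segments 1).map (fun i => i * s + offset))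
  let rows := (PySem.List.pyRange 0 r 1).foldl (pvBRemStep num_frames s num_segments) rows
  let first_row := (PySem.List.enumerate rows 0).foldl pvBDictStep PySem.Dict.empty
  let masks := (PySem.List.enumerate rows 0).map
      (fun p => p.2.map (fun idx => if first_row.get? idx = some p.1 then (1 : Int) else 0))
  (rows, masks)

-- ===== PRECONDITION & SPEC =====
-- Pre_ excludes exactly num_segments = 0, where A raises ZeroDivisionError (so does B).
def Pre_sliding_segment_with_mask (num_frames : Int) (num_segments : Int) : Prop :=
  num_segments ≠ 0
instance (num_frames : Int) (num_segments : Int) :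
    Decidable (Pre_sliding_segment_with_mask num_frames num_segments) := by
  unfold Pre_sliding_segment_with_mask; infer_instance

def pvWitness_sliding_segment_with_mask : Int × Int := (48, 8)

def Spec_sliding_segment_with_mask (num_frames : Int) (num_segments : Int)
    (out : List (List Int) × List (List Int)) : Prop :=
  out = sliding_segment_with_mask_alt num_frames num_segments
instance (num_frames : Int) (num_segments : Int) (out : List (List Int) × List (List Int)) :
    Decidable (Spec_sliding_segment_with_mask num_frames num_segments out) := by
  unfold Spec_sliding_segment_with_mask; infer_instance

-- ===== CLAIM (what is proved, stated in full; the proofs are below) =====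
def Claim_equal_sliding_segment_with_mask : Prop :=
  ∀ (num_frames : Int) (num_segments : Int),
    Dom_sliding_segment_with_mask num_frames num_segments →
    Pre_sliding_segment_with_mask num_frames num_segments →
    Spec_sliding_segment_with_mask num_frames num_segments
      (sliding_segment_with_mask num_frames num_segments)

-- ===== LEMMAS AND PROOFS =====

-- A's per-row mask/seen update, its construction loop abstracted over an optional row producer
def pvMaskStep (st : List (List Int) × PySem.Set Int) (row : List Int) :
    List (List Int) × PySem.Set Int :=
  (st.1 ++ [row.map (fun idx => if PySem.Set.contains st.2 idx then (0 : Int) else 1)],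
   PySem.Set.update st.2 row)
def pvGenStep (rowf : Int → Option (List Int))
    (st : List (List Int) × List (List Int) × PySem.Set Int) (x : Int) :
    List (List Int) × List (List Int) × PySem.Set Int :=
  match rowf x with
  | none => st
  | some row =>
      (st.1 ++ [row],
       st.2.1 ++ [row.map (fun idx => if PySem.Set.contains st.2.2 idx then (0 : Int) else 1)],
       PySem.Set.update st.2.2 row)

-- first row (counting from t) whose list contains idx
def pvFirst (idx : Int) : List (List Int) → Int → Option Int
  | [], _ => none
  | row :: rest, t => if idx ∈ row then some t else pvFirst idx rest (t + 1)

def pvDictOf (rows : List (List Int)) : PySem.Dict Int Int :=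
  (PySem.List.enumerate rows 0).foldl pvBDictStep PySem.Dict.empty

lemma pvAMainStep_eq (s ns : Int) :
    pvAMainStep s ns
      = pvGenStep (fun off => some ((PySem.List.pyRange 0 ns 1).map (fun i => i * s + off))) := by
  funext st off; rfl

lemma pvARemStep_eq (nf s ns : Int) :
    pvARemStep nf s ns
      = pvGenStep (fun off =>
          let row := ((PySem.List.pyRange 0 ns 1).map (fun i => i * s + s + off)).filter
            (fun idx => decide (idx < nf))
          if row.isEmpty then none else some row) := by
  funext st off
  simp only [pvARemStep, pvGenStep]
  split <;> rfl

lemma pvFoldGen (rowf : Int → Option (List Int)) (xs : List Int) :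
    ∀ (R M : List (List Int)) (S : PySem.Set Int),
    xs.foldl (pvGenStep rowf) (R, M, S)
      = (R ++ xs.filterMap rowf,
         ((xs.filterMap rowf).foldl pvMaskStep (M, S)).1,
         ((xs.filterMap rowf).foldl pvMaskStep (M, S)).2) := by
  induction xs with
  | nil => intro R M S; simp
  | cons x xs ih =>
    intro R M S
    simp only [List.foldl_cons, List.filterMap_cons]
    cases h : rowf x with
    | none => simp only [pvGenStep, h]; exact ih R M S
    | some row =>
      simp only [pvGenStep, h, List.foldl_cons]
      rw [ih]
      simp [pvMaskStep]

lemma pvBRows (nf s ns : Int) (xs : List Int) :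
    ∀ rows0 : List (List Int),
    xs.foldl (pvBRemStep nf s ns) rows0
      = rows0 ++ xs.filterMap (fun off =>
          let row := ((PySem.List.pyRange 0 ns 1).map (fun i => i * s + s + off)).filter
            (fun idx => decide (idx < nf))
          if row.isEmpty then none else some row) := by
  induction xs with
  | nil => intro rows0; simp
  | cons x xs ih =>
    intro rows0
    simp only [List.foldl_cons, List.filterMap_cons, pvBRemStep]
    split
    · simp only [ih]
    · rw [ih]; simp

lemma pvRowDict (row : List Int) (t : Int) :
    ∀ (d : PySem.Dict Int Int) (idx : Int),
    (row.foldl (fun d i => PySem.Dict.setdefault d i t) d).get? idx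
      = match d.get? idx with
        | some v => some v
        | none => if idx ∈ row then some t else none := by
  induction row with
  | nil => intro d idx; cases h : d.get? idx <;> simp [h]
  | cons x xs ih =>
    intro d idx
    rw [List.foldl_cons, ih]
    by_cases hx : idx = x
    · subst hx
      rw [PySem.Dict.get?_setdefault_self]
      cases h : d.get? idx <;> simp_all
    · rw [PySem.Dict.get?_setdefault_of_ne d t hx]
      cases h : d.get? idx <;> simp_all

lemma pvDictGet (rows : List (List Int)) :
    ∀ (start : Int) (d : PySem.Dict Int Int) (idx : Int),
    ((PySem.List.enumerate rows start).foldl pvBDictStep d).get? idx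
      = match d.get? idx with
        | some v => some v
        | none => pvFirst idx rows start := by
  induction rows with
  | nil => intro start d idx; cases h : d.get? idx <;> simp [PySem.List.enumerate_nil, pvFirst, h]
  | cons row rest ih =>
    intro start d idx
    rw [PySem.List.enumerate_cons, List.foldl_cons]
    show ((PySem.List.enumerate rest (start + 1)).foldl pvBDictStep (pvBDictStep d (start, row))).get? idx = _
    rw [ih, pvFirst]
    show (match (row.foldl (fun d i => PySem.Dict.setdefault d i start) d).get? idx with
      | some v => some v | none => pvFirst idx rest (start + 1)) = _
    rw [pvRowDict]
    cases h : d.get? idx with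
    | some v => simp
    | none => by_cases hm : idx ∈ row <;> simp [hm]

lemma pvFirst_isSome (idx : Int) (rows : List (List Int)) :
    ∀ t : Int, (pvFirst idx rows t).isSome = true ↔ ∃ row ∈ rows, idx ∈ row := by
  induction rows with
  | nil => intro t; simp [pvFirst]
  | cons row rest ih =>
    intro t
    by_cases hm : idx ∈ row
    · simp [pvFirst, hm]
    · simp [pvFirst, hm, ih]

lemma pvFirst_lt (idx : Int) (rows : List (List Int)) :
    ∀ (t v : Int), pvFirst idx rows t = some v → t ≤ v ∧ v < t + rows.length := by
  induction rows with
  | nil => intro t v h; simp [pvFirst] at h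
  | cons row rest ih =>
    intro t v h
    by_cases hm : idx ∈ row
    · simp only [pvFirst, if_pos hm, Option.some.injEq] at h
      subst h
      simp only [List.length_cons]
      push_cast
      omega
    · simp only [pvFirst, if_neg hm] at h
      have := ih (t + 1) v h
      simp only [List.length_cons]
      push_cast at this ⊢
      omega

lemma pvFirst_append (idx : Int) (xs : List (List Int)) :
    ∀ (ys : List (List Int)) (t : Int),
    pvFirst idx (xs ++ ys) t
      = ((pvFirst idx xs t).or (pvFirst idx ys (t + xs.length))) := by
  induction xs with
  | nil => intro ys t; simp [pvFirst]
  | cons row rest ih =>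
    intro ys t
    by_cases hm : idx ∈ row
    · simp [pvFirst, hm]
    · simp only [List.cons_append, pvFirst, if_neg hm, ih, List.length_cons]
      congr 2
      push_cast
      ring

lemma pvMaskSpec (todo : List (List Int)) :
    ∀ (done M : List (List Int)) (S : PySem.Set Int),
    (∀ idx : Int, PySem.Set.contains S idx = true ↔ ∃ row ∈ done, idx ∈ row) →
    (todo.foldl pvMaskStep (M, S)).1
      = M ++ (PySem.List.enumerate todo (done.length : Int)).map
          (fun p => p.2.map (fun idx =>
            if (pvDictOf (done ++ todo)).get? idx = some p.1 then (1 : Int) else 0)) := by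
  induction todo with
  | nil =>
    intro done M S hS
    simp [PySem.List.enumerate_nil]
  | cons row rest ih =>
    intro done M S hS
    rw [List.foldl_cons, PySem.List.enumerate_cons, List.map_cons]
    have hmask : row.map (fun idx => if PySem.Set.contains S idx then (0 : Int) else 1)
        = row.map (fun idx => if (pvDictOf (done ++ row :: rest)).get? idx
            = some ((done.length : Nat) : Int) then (1 : Int) else 0) := by
      apply List.map_congr_left
      intro idx hidx
      have hget : (pvDictOf (done ++ row :: rest)).get? idx
          = pvFirst idx (done ++ row :: rest) 0 := by
        rw [pvDictOf, pvDictGet]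
        simp [PySem.Dict.get?_empty]
      rw [hget, pvFirst_append]
      by_cases hc : PySem.Set.contains S idx = true
      · obtain ⟨r0, hr0, hir⟩ := (hS idx).mp hc
        have hsome : (pvFirst idx done 0).isSome = true :=
          (pvFirst_isSome idx done 0).mpr ⟨r0, hr0, hir⟩
        obtain ⟨v, hv⟩ := Option.isSome_iff_exists.mp hsome
        have hb := pvFirst_lt idx done 0 v hv
        rw [hv, hc, if_pos rfl, Option.or, if_neg]
        intro he
        have : v = ((done.length : Nat) : Int) := by injection he
        omega
      · have hnone : pvFirst idx done 0 = none := by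
          cases h : pvFirst idx done 0 with
          | none => rfl
          | some v =>
            exact absurd ((hS idx).mpr ((pvFirst_isSome idx done 0).mp (by simp [h]))) hc
        rw [hnone, Option.or, pvFirst, if_pos hidx, if_neg hc]
        simp
    have hS' : ∀ idx : Int, PySem.Set.contains (PySem.Set.update S row) idx = true
        ↔ ∃ r0 ∈ done ++ [row], idx ∈ r0 := by
      intro idx
      rw [PySem.Set.contains_iff, PySem.Set.mem_update, ← PySem.Set.contains_iff, hS idx]
      simp only [List.mem_append, List.mem_singleton]
      constructor
      · rintro (⟨r0, h1, h2⟩ | h)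
        · exact ⟨r0, Or.inl h1, h2⟩
        · exact ⟨row, Or.inr rfl, h⟩
      · rintro ⟨r0, h1 | h1, h2⟩
        · exact Or.inl ⟨r0, h1, h2⟩
        · subst h1; exact Or.inr h2
    have hrec := ih (done ++ [row])
      (M ++ [row.map (fun idx => if PySem.Set.contains S idx then (0 : Int) else 1)])
      (PySem.Set.update S row) hS'
    show ((rest.foldl pvMaskStep (pvMaskStep (M, S) row))).1 = _
    rw [show pvMaskStep (M, S) row
        = (M ++ [row.map (fun idx => if PySem.Set.contains S idx then (0 : Int) else 1)],
           PySem.Set.update S row) from rfl]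
    rw [hrec, hmask]
    have hlen : (((done ++ [row]).length : Nat) : Int) = ((done.length : Nat) : Int) + 1 := by
      simp [List.length_append]
    rw [hlen]
    simp [List.append_assoc]

-- ===== VERDICT (by name: the statement is the Claim_ definition above) =====
theorem sliding_segment_with_mask_spec : Claim_equal_sliding_segment_with_mask := by
  intro nf ns _ hpre
  unfold Spec_sliding_segment_with_mask
  simp only [sliding_segment_with_mask, sliding_segment_with_mask_alt]
  set s := PySem.Int.floordiv nf ns with hs
  set r := PySem.Int.mod nf ns with hr
  have hif : ∀ st : List (List Int) × List (List Int) × PySem.Set Int,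
      (if r > 0 then (PySem.List.pyRange 0 r 1).foldl (pvARemStep nf s ns) st else st)
        = (PySem.List.pyRange 0 r 1).foldl (pvARemStep nf s ns) st := by
    intro st
    split
    · rfl
    · rw [PySem.List.pyRange_one_eq_nil (by omega)]
      rfl
  rw [hif]
  rw [pvAMainStep_eq, pvARemStep_eq, pvFoldGen]
  rw [pvFoldGen]
  rw [pvBRows]
  set rowfR : Int → Option (List Int) := fun off =>
      let row := ((PySem.List.pyRange 0 ns 1).map (fun i => i * s + s + off)).filter
        (fun idx => decide (idx < nf))
      if row.isEmpty then none else some row with hrowfR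
  have hfm : (PySem.List.pyRange 0 s 1).filterMap
      (fun off => some ((PySem.List.pyRange 0 ns 1).map (fun i => i * s + off)))
      = (PySem.List.pyRange 0 s 1).map
      (fun off => (PySem.List.pyRange 0 ns 1).map (fun i => i * s + off)) := by
    induction (PySem.List.pyRange 0 s 1) with
    | nil => rfl
    | cons x xs ih => simp [ih]
  rw [hfm]
  set mainRows := (PySem.List.pyRange 0 s 1).map
      (fun off => (PySem.List.pyRange 0 ns 1).map (fun i => i * s + off)) with hmain
  set remRows := (PySem.List.pyRange 0 r 1).filterMap rowfR with hrem
  have hnilapp : ([] : List (List Int)) ++ mainRows = mainRows := by simp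
  rw [hnilapp, Prod.mk.eta]
  have hcomp : remRows.foldl pvMaskStep (mainRows.foldl pvMaskStep ([], PySem.Set.empty))
      = (mainRows ++ remRows).foldl pvMaskStep ([], PySem.Set.empty) := by
    rw [List.foldl_append]
  rw [hcomp]
  have hempty : ∀ idx : Int, PySem.Set.contains (PySem.Set.empty : PySem.Set Int) idx = true
      ↔ ∃ r0 ∈ ([] : List (List Int)), idx ∈ r0 := by
    intro idx
    rw [PySem.Set.contains_iff]
    simp [PySem.Set.empty]
  have hspec := pvMaskSpec (mainRows ++ remRows) [] [] PySem.Set.empty hempty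
  simp only [List.nil_append, List.length_nil, Nat.cast_zero] at hspec
  rw [hspec]
  rfl
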